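-- pv_equiv track=rewrite | github.com/Anthony-Faria-dos-santos/CCNA-exam-prep-support-material | scripts/qa_quarto.py | strip_code_blocks
-- ===== SOURCE A (Python) =====
-- def strip_code_blocks(lines: list[str]) -> list[str]:
--     """Retourne les lignes hors blocs ```...``` ."""
--     out = []
--     in_fence = False
--     fence_char = None
--     for line in lines:
--         stripped = line.lstrip()
--         if not in_fence and (stripped.startswith("```") or stripped.startswith("~~~")):
--             in_fence = True
--             fence_char = stripped[:3]
--             out.append("")  # placeholder
--             continue
--         if in_fence and stripped.startswith(fence_char):
--             in_fence = False
--             out.append("")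
--             continue
--         if in_fence:
--             out.append("")
--         else:
--             out.append(line)
--     return out
-- ===== SOURCE B (Python) =====
-- def strip_code_blocks(lines: list[str]) -> list[str]:
--     """Retourne les lignes hors blocs ```...``` ."""
--     out = []
--     i = 0
--     n = len(lines)
--     while i < n:
--         stripped = lines[i].lstrip()
--         if stripped.startswith("```") or stripped.startswith("~~~"):
--             fence = stripped[:3]
--             out.append("")  # opener
--             j = i + 1
--             while j < n and not lines[j].lstrip().startswith(fence):
--                 out.append("")
--                 j += 1
--             if j < n:
--                 out.append("")  # closer
--                 j += 1
--             i = j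
--         else:
--             out.append(lines[i])
--             i += 1
--     return out
-- ===== Notes on version B (the rewrite author's own statement) =====
-- stated objective: alternative
-- what changed: Replaces A's single foldl-style pass with an in_fence boolean and fence_char state by an index-driven outer loop that, on seeing an opener, consumes the whole fenced block with an inner loop up to the matching close (or end of input), so no per-line mode flag is carried.
import Mathlib
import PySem

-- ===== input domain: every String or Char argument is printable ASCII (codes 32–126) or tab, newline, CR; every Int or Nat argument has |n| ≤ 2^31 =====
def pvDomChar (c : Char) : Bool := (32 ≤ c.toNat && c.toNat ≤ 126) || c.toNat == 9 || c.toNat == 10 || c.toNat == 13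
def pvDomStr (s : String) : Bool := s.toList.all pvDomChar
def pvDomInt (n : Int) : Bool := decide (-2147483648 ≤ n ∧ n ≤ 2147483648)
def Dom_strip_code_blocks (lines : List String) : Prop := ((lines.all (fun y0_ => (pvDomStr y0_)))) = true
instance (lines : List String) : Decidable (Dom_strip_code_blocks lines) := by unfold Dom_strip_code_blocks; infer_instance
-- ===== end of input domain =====

-- B replaces A's single pass with an in_fence boolean and fence_char state by a consume-the-block
-- decomposition: an outer scan over lines plus an inner skip that blanks a whole fenced block
-- up to its closing fence (alternative decomposition, same cost).


-- ===== PORT A =====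
-- state = (out in reverse order, in_fence, fence_char); fence_char is None only while not in_fence,
-- so the '.getD ""' default in the close test is never the value Python would raise on.
def stripA_step (st : List String × Bool × Option String) (line : String) : List String × Bool × Option String :=
  let out := st.1
  let in_fence := st.2.1
  let fence_char := st.2.2
  let stripped := PySem.Str.lstrip line
  if !in_fence && (PySem.Str.startswith stripped "```" || PySem.Str.startswith stripped "~~~") then
    ("" :: out, true, some (PySem.Str.slice stripped none (some 3)))
  else if in_fence && PySem.Str.startswith stripped (fence_char.getD "") then
    ("" :: out, false, fence_char)
  else if in_fence then
    ("" :: out, in_fence, fence_char)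
  else
    (line :: out, in_fence, fence_char)

def strip_code_blocks (lines : List String) : List String :=
  (lines.foldl stripA_step ([], false, none)).1.reverse

-- ===== PORT B =====
mutual
-- outer loop: outside any fence
def stripB_go : List String → List String
  | [] => []
  | l :: rest =>
    let stripped := PySem.Str.lstrip l
    if PySem.Str.startswith stripped "```" || PySem.Str.startswith stripped "~~~" then
      "" :: stripB_skip (PySem.Str.slice stripped none (some 3)) rest
    else
      l :: stripB_go rest
-- inner loop: blank lines until the closing fence (inclusive), or to the end
def stripB_skip (fence : String) : List String → List String
  | [] => []
  | l :: rest =>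
    if PySem.Str.startswith (PySem.Str.lstrip l) fence then
      "" :: stripB_go rest
    else
      "" :: stripB_skip fence rest
end

def strip_code_blocks_alt (lines : List String) : List String := stripB_go lines

-- ===== PRECONDITION & SPEC =====
def Spec_strip_code_blocks (lines : List String) (out : List String) : Prop := out = strip_code_blocks_alt lines
instance (lines : List String) (out : List String) : Decidable (Spec_strip_code_blocks lines out) := by unfold Spec_strip_code_blocks; infer_instance

-- ===== CLAIM (what is proved, stated in full; the proofs are below) =====
def Claim_equal_strip_code_blocks : Prop := ∀ (lines : List String), Dom_strip_code_blocks lines → Spec_strip_code_blocks lines (strip_code_blocks lines)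

-- ===== LEMMAS AND PROOFS =====
lemma stripAB_key (rest : List String) :
    (∀ (out : List String) (fc : Option String),
        (rest.foldl stripA_step (out, false, fc)).1 = (stripB_go rest).reverse ++ out) ∧
    (∀ (out : List String) (f : String),
        (rest.foldl stripA_step (out, true, some f)).1 = (stripB_skip f rest).reverse ++ out) := by
  induction rest with
  | nil => simp [stripB_go, stripB_skip]
  | cons l rest ih =>
    constructor
    · intro out fc
      simp only [List.foldl, stripA_step, stripB_go, Bool.not_false, Bool.true_and,
        Bool.false_and, Bool.false_eq_true, if_false]
      split_ifs with h
      · simp [ih.2]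
      · simp [ih.1]
    · intro out f
      simp only [List.foldl, stripA_step, stripB_skip, Bool.not_true, Bool.false_and,
        Bool.true_and, Option.getD_some, Bool.false_eq_true, if_false]
      split_ifs with h
      · simp [ih.1]
      · simp [ih.2]

-- ===== VERDICT (by name: the statement is the Claim_ definition above) =====
theorem strip_code_blocks_spec : Claim_equal_strip_code_blocks := by
  intro lines _
  show strip_code_blocks lines = strip_code_blocks_alt lines
  simp [strip_code_blocks, strip_code_blocks_alt, (stripAB_key lines).1]
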